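-- pv_equiv track=rewrite | github.com/Zac2116/TextMining | lib/removeDot.py | removeDot
-- ===== SOURCE A (Python) =====
-- def removeDot(s):
--         num = ["0","1","2","3","4","5","6","7","8","9"]
--         if s[0] == ".":
--                 s = removeDot(s[1:])
--         elif s[len(s)-1]==".":
--                 s = removeDot(s[:-1])
--         else:
--                 for i in range(1,len(s)-1):
--                         if s[i]=="." and (s[i-1] not in num or s[i+1] not in num):
--                                 s = removeDot(s[:i]+s[i+1:])
--                                 break
--         return s
-- ===== SOURCE B (Python) =====
-- def removeDot(s):
--     digits = "0123456789"
--     out = []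
--     i = 0
--     n = len(s)
--     while True:
--         j = s.find(".", i)
--         if j == -1:
--             out.append(s[i:])
--             break
--         out.append(s[i:j])
--         k = j
--         while k < n and s[k] == ".":
--             k += 1
--         if j > 0 and s[j-1] in digits and k < n and s[k] in digits:
--             out.append(".")
--         i = k
--     return "".join(out)
-- ===== Notes on version B (the rewrite author's own statement) =====
-- stated objective: faster
-- what changed: A repeatedly rescans the string and recurses, deleting one offending dot per pass; B makes a single left-to-right pass that collapses each maximal dot-run to one dot iff it is flanked by digits and drops it otherwise.
import Mathlib
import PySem

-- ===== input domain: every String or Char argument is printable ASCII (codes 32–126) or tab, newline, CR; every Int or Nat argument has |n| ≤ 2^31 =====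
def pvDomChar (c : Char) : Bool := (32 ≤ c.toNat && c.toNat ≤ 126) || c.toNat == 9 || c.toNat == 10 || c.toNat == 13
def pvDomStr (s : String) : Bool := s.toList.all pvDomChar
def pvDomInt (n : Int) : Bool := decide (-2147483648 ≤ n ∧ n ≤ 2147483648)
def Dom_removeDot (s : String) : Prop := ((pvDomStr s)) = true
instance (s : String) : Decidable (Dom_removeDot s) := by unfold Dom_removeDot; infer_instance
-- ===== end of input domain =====

-- B replaces A's quadratic delete-one-dot-and-recurse scheme by a single left-to-right
-- pass that collapses each maximal dot-run to one dot iff it is flanked by digits and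
-- drops it otherwise (objective: faster, asymptotic).

-- ===== PORT A =====
def pvNum : List Char := ['0', '1', '2', '3', '4', '5', '6', '7', '8', '9']

-- the for-loop of A: first i in [i0, len-1) with s[i]="." and a non-digit neighbour
def findBad (l : List Char) (i : Nat) : Option Nat :=
  if _h : i < l.length - 1 then
    if l.getD i ' ' = '.' ∧ (l.getD (i-1) ' ' ∉ pvNum ∨ l.getD (i+1) ' ' ∉ pvNum)
    then some i else findBad l (i+1)
  else none
termination_by l.length - 1 - i

theorem findBad_lt {l : List Char} {i j : Nat} (h : findBad l i = some j) :
    j < l.length - 1 := by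
  fun_induction findBad l i with
  | case1 i hi hc => simp_all
  | case2 i hi hc ih => exact ih h
  | case3 i hi => simp_all

-- remA l = some r  when the Python returns r;  none = IndexError (s[0] on "")
def remA (l : List Char) : Option (List Char) :=
  match l with
  | [] => none
  | c :: t =>
    if c = '.' then remA t
    else if (c :: t).getLast? = some '.' then remA (c :: t).dropLast
    else
      match _h : findBad (c :: t) 1 with
      | some i => remA ((c :: t).take i ++ (c :: t).drop (i+1))
      | none => some (c :: t)
termination_by l.length
decreasing_by
  · simp
  · simp [List.length_dropLast]
  · have := findBad_lt _h; simp at this ⊢; omega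

def removeDot (s : String) : String :=
  match remA s.toList with
  | some l => String.ofList l
  | none => ""

-- ===== PORT B =====
def isNum (c : Char) : Bool := "0123456789".toList.contains c

-- the inner while: first j ≥ i with j = len or s[j] ≠ "."
def skipDots (l : List Char) (j : Nat) : Nat :=
  if _h : j < l.length then
    if l.getD j ' ' = '.' then skipDots l (j+1) else j
  else j
termination_by l.length - j

theorem skipDots_ge (l : List Char) (j : Nat) : j ≤ skipDots l j := by
  fun_induction skipDots l j with
  | case1 j hj hc ih => omega
  | case2 j hj hc => omega
  | case3 j hj => omega

theorem skipDots_gt {l : List Char} {i : Nat} (hi : i < l.length)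
    (hc : l.getD i ' ' = '.') : i < skipDots l i := by
  rw [skipDots, dif_pos hi, if_pos hc]
  have := skipDots_ge l (i+1); omega

-- s.find(".", i): the first index j ≥ i with s[j] = "." (none = Python's -1)
def findDot (l : List Char) (i : Nat) : Option Nat :=
  if _h : i < l.length then
    if l.getD i ' ' = '.' then some i else findDot l (i+1)
  else none
termination_by l.length - i

theorem findDot_some_facts {l : List Char} {i j : Nat} (h : findDot l i = some j) :
    i ≤ j ∧ j < l.length ∧ l.getD j ' ' = '.' := by
  fun_induction findDot l i with
  | case1 i hi hc =>
    simp at h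
    subst h
    exact ⟨le_rfl, hi, hc⟩
  | case2 i hi hc ih =>
    obtain ⟨h1, h2, h3⟩ := ih h
    exact ⟨by omega, h2, h3⟩
  | case3 i hi => simp at h

-- the outer while-True loop of B, state (i, out); out kept as one flat character list
def bloop (l : List Char) (i : Nat) (out : List Char) : List Char :=
  match _hf : findDot l i with
  | none => out ++ l.drop i
  | some j =>
    bloop l (skipDots l j)
      (if 0 < j ∧ isNum (l.getD (j-1) ' ') ∧ skipDots l j < l.length ∧
          isNum (l.getD (skipDots l j) ' ')
       then (out ++ (l.drop i).take (j - i)) ++ ['.']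
       else out ++ (l.drop i).take (j - i))
termination_by l.length - i
decreasing_by
  have hf := findDot_some_facts _hf
  have := skipDots_gt hf.2.1 hf.2.2
  omega

def removeDot_alt (s : String) : String := String.ofList (bloop s.toList 0 [])

-- ===== PRECONDITION & SPEC =====
-- Pre_ excludes exactly the inputs on which A raises IndexError: the strings
-- consisting only of dots (including ""), on which A's recursion reaches s[0] on "".
def Pre_removeDot (s : String) : Prop := s.toList.any (· ≠ '.') = true
instance (s : String) : Decidable (Pre_removeDot s) := by unfold Pre_removeDot; infer_instance
def pvWitness_removeDot : String := "a.1"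

def Spec_removeDot (s : String) (out : String) : Prop := out = removeDot_alt s
instance (s : String) (out : String) : Decidable (Spec_removeDot s out) := by unfold Spec_removeDot; infer_instance

-- ===== CLAIM (what is proved, stated in full; the proofs are below) =====
def Claim_equal_removeDot : Prop := ∀ (s : String), Dom_removeDot s → Pre_removeDot s → Spec_removeDot s (removeDot s)

-- ===== LEMMAS AND PROOFS =====

-- run-collapsing pass in structural form: prev = the character before the current suffix
def digitO : Option Char → Bool
  | some p => isNum p
  | none => false

def headNum : List Char → Bool
  | d :: _ => isNum d
  | [] => false

def altGo : Option Char → List Char → List Char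
  | _, [] => []
  | prev, c :: t =>
    if c = '.' then
      (if digitO prev && headNum (t.dropWhile (· = '.')) then ['.'] else []) ++
        altGo none (t.dropWhile (· = '.'))
    else c :: altGo (some c) t
termination_by _ l => l.length
decreasing_by
  · have := List.length_dropWhile_le (· = '.') t; simp at this ⊢; omega
  · simp

theorem altGo_nil (p : Option Char) : altGo p [] = [] := by
  rw [altGo.eq_def]

theorem altGo_cons (p : Option Char) (c : Char) (t : List Char) :
    altGo p (c :: t) =
      if c = '.' then
        (if digitO p && headNum (t.dropWhile (· = '.')) then ['.'] else []) ++
          altGo none (t.dropWhile (· = '.'))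
      else c :: altGo (some c) t := by
  rw [altGo.eq_def]

theorem numIff (c : Char) : c ∈ pvNum ↔ isNum c = true := by
  simp [isNum, pvNum]

theorem altGo_nondigit {p : Char} (hp : isNum p = false) (t : List Char) :
    altGo (some p) t = altGo none t := by
  cases t with
  | nil => simp [altGo_nil, altGo_cons]
  | cons c t =>
    by_cases hc : c = '.'
    · subst hc; simp [altGo_nil, altGo_cons, digitO, hp]
    · simp [altGo_nil, altGo_cons, hc]

theorem altGo_cons_dot (t : List Char) : altGo none ('.' :: t) = altGo none t := by
  cases t with
  | nil => simp [altGo_nil, altGo_cons, digitO]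
  | cons c t =>
    by_cases hc : c = '.'
    · subst hc
      simp [altGo_nil, altGo_cons, digitO]
    · simp [altGo_nil, altGo_cons, digitO, hc]

theorem dropWhile_ne_head {p : Char → Bool} : ∀ (l : List Char) (x : Char) (xs : List Char),
    l.dropWhile p = x :: xs → p x = false := by
  intro l
  induction l with
  | nil => intro x xs h; simp at h
  | cons c t ih =>
    intro x xs h
    rw [List.dropWhile_cons] at h
    by_cases hc : p c
    · rw [if_pos hc] at h; exact ih x xs h
    · rw [if_neg hc] at h
      cases h
      simpa using hc

theorem getLast?_dropWhile {p : Char → Bool} : ∀ (l : List Char),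
    l.dropWhile p ≠ [] → (l.dropWhile p).getLast? = l.getLast? := by
  intro l
  induction l with
  | nil => simp
  | cons c t ih =>
    intro h
    rw [List.dropWhile_cons] at h ⊢
    by_cases hc : p c
    · rw [if_pos hc] at h ⊢
      have ht : t ≠ [] := by rintro rfl; simp at h
      obtain ⟨d, r, rfl⟩ := List.exists_cons_of_ne_nil ht
      rw [ih h, List.getLast?_cons_cons]
    · rw [if_neg hc]

theorem dropWhile_dropLast {p : Char → Bool} : ∀ (l : List Char), (∃ x ∈ l, p x = false) →
    (l.dropLast).dropWhile p = (l.dropWhile p).dropLast := by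
  intro l
  induction l with
  | nil => simp
  | cons c t ih =>
    intro hx
    by_cases hc : p c
    · have ht : t ≠ [] := by
        rintro rfl
        obtain ⟨x, hm, hpx⟩ := hx
        simp at hm; subst hm; simp [hc] at hpx
      rw [List.dropLast_cons_of_ne_nil ht, List.dropWhile_cons, List.dropWhile_cons,
        if_pos hc, if_pos hc]
      apply ih
      obtain ⟨x, hm, hpx⟩ := hx
      simp at hm
      rcases hm with rfl | hm
      · rw [hc] at hpx; simp at hpx
      · exact ⟨x, hm, hpx⟩
    · cases t with
      | nil => simp [List.dropWhile_cons, hc]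
      | cons d r =>
        have h1 : (c :: d :: r).dropLast = c :: (d :: r).dropLast :=
          List.dropLast_cons_of_ne_nil (by simp)
        rw [h1, List.dropWhile_cons, List.dropWhile_cons, if_neg hc, if_neg hc, h1]

theorem altGo_dropLast_aux : ∀ (n : Nat) (l : List Char) (prev : Option Char), l.length ≤ n →
    l.getLast? = some '.' → altGo prev l = altGo prev l.dropLast := by
  intro n
  induction n with
  | zero => intro l prev hn hl; interval_cases hx : l.length <;> simp_all
  | succ n ih =>
    intro l prev hn hl
    match l with
    | [] => simp at hl
    | [c] =>
      simp at hl
      subst hl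
      simp [altGo_cons, altGo_nil, headNum]
    | c :: d :: r =>
      rw [List.getLast?_cons_cons] at hl
      have hdl : (c :: d :: r).dropLast = c :: (d :: r).dropLast :=
        List.dropLast_cons_of_ne_nil (by simp)
      by_cases hc : c = '.'
      · subst hc
        rw [hdl, altGo_cons prev '.' (d :: r), altGo_cons prev '.' ((d :: r).dropLast),
          if_pos rfl, if_pos rfl]
        by_cases hall : (d :: r).dropWhile (· = '.') = []
        · have hall2 : ((d :: r).dropLast).dropWhile (· = '.') = [] := by
            rw [List.dropWhile_eq_nil_iff] at hall ⊢
            intro x hx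
            exact hall x (List.mem_of_mem_dropLast hx)
          simp [hall, hall2, headNum, altGo_nil]
        · have hwit : ∃ x ∈ d :: r, (x = '.' : Bool) = false := by
            rw [List.dropWhile_eq_nil_iff] at hall
            push_neg at hall
            obtain ⟨x, hm, hpx⟩ := hall
            exact ⟨x, hm, by simpa using hpx⟩
          rw [dropWhile_dropLast _ hwit]
          set t1 := (d :: r).dropWhile (· = '.') with ht1
          obtain ⟨x, xs, hx⟩ := List.exists_cons_of_ne_nil hall
          have hxnd : (x = '.' : Bool) = false := dropWhile_ne_head _ _ _ (ht1 ▸ hx)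
          have hlast1 : t1.getLast? = some '.' := by
            rw [ht1, getLast?_dropWhile _ hall]; exact hl
          have hxs : xs ≠ [] := by
            rintro rfl
            rw [hx] at hlast1
            simp at hlast1
            subst hlast1
            simp at hxnd
          obtain ⟨y, ys, rfl⟩ := List.exists_cons_of_ne_nil hxs
          have hlen1 : t1.length ≤ n := by
            have := List.length_dropWhile_le (fun x => decide (x = '.')) (d :: r)
            rw [← ht1] at this
            simp at hn this ⊢
            omega
          have hrec := ih t1 none hlen1 hlast1
          rw [hx] at hrec
          have hdl2 : (x :: y :: ys).dropLast = x :: (y :: ys).dropLast :=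
            List.dropLast_cons_of_ne_nil (by simp)
          rw [hx, hdl2]
          rw [hdl2] at hrec
          simp [headNum, hrec]
      · rw [hdl, altGo_cons prev c (d :: r), altGo_cons prev c ((d :: r).dropLast),
          if_neg hc, if_neg hc]
        have : altGo (some c) (d :: r) = altGo (some c) ((d :: r).dropLast) := by
          apply ih
          · simp at hn ⊢; omega
          · exact hl
        rw [this]

theorem altGo_dropLast (prev : Option Char) (l : List Char)
    (h : l.getLast? = some '.') : altGo prev l = altGo prev l.dropLast :=
  altGo_dropLast_aux l.length l prev le_rfl h

def badAt (l : List Char) (k : Nat) : Prop :=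
  l.getD k ' ' = '.' ∧ (l.getD (k-1) ' ' ∉ pvNum ∨ l.getD (k+1) ' ' ∉ pvNum)

theorem findBad_none {l : List Char} {i : Nat} (h : findBad l i = none) :
    ∀ k, i ≤ k → k < l.length - 1 → ¬ badAt l k := by
  fun_induction findBad l i with
  | case1 i hi hc => simp_all
  | case2 i hi hc ih =>
    intro k hk hk2
    rcases Nat.eq_or_lt_of_le hk with rfl | hlt
    · intro hb; exact hc ⟨hb.1, hb.2⟩
    · exact ih h k hlt hk2
  | case3 i hi => intro k hk hk2; omega

theorem findBad_some {l : List Char} {i j : Nat} (h : findBad l i = some j) :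
    i ≤ j ∧ badAt l j ∧ ∀ k, i ≤ k → k < j → ¬ badAt l k := by
  fun_induction findBad l i with
  | case1 i hi hc =>
    simp at h
    subst h
    exact ⟨le_rfl, ⟨hc.1, hc.2⟩, fun k hk1 hk2 => absurd hk1 (by omega)⟩
  | case2 i hi hc ih =>
    obtain ⟨h1, h2, h3⟩ := ih h
    refine ⟨by omega, h2, fun k hk1 hk2 => ?_⟩
    rcases Nat.eq_or_lt_of_le hk1 with rfl | hlt
    · intro hb; exact hc ⟨hb.1, hb.2⟩
    · exact h3 k hlt hk2
  | case3 i hi => simp at h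

theorem getLastD_cons' (c : Char) (t : List Char) (p : Char) :
    (c :: t).getLastD p = t.getLastD c := by
  cases t with
  | nil => rfl
  | cons d r =>
    show (c :: d :: r).getLast?.getD p = (d :: r).getLast?.getD c
    rw [List.getLast?_cons_cons]
    obtain ⟨x, hx⟩ := Option.isSome_iff_exists.mp (by simp : (d :: r).getLast?.isSome)
    rw [hx]; rfl

theorem drop_cons_getD {l : List Char} {i : Nat} (h : i < l.length) :
    l.drop i = l.getD i ' ' :: l.drop (i+1) := by
  rw [List.drop_eq_getElem_cons h, List.getD_eq_getElem _ _ h]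

theorem isNum_ne_dot {d : Char} (h : isNum d = true) : d ≠ '.' := by
  rintro rfl; simp [isNum] at h

-- "no bad dot from here on, given previous char p"
def nfFrom : Char → List Char → Prop
  | _, [] => True
  | p, c :: t => (c = '.' → isNum p = true ∧ headNum t = true) ∧ nfFrom c t

theorem altGo_nf_aux : ∀ (n : Nat) (p : Char) (t : List Char), t.length ≤ n →
    nfFrom p t → altGo (some p) t = t := by
  intro n
  induction n with
  | zero =>
    intro p t hn _
    have : t = [] := by cases t <;> simp_all
    subst this; exact altGo_nil _
  | succ n ih =>
    intro p t hn h
    cases t with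
    | nil => exact altGo_nil _
    | cons c r =>
      by_cases hc : c = '.'
      · subst hc
        obtain ⟨hp, hh⟩ := h.1 rfl
        cases r with
        | nil => simp [headNum] at hh
        | cons d r2 =>
          simp only [headNum] at hh
          have hd : d ≠ '.' := isNum_ne_dot hh
          have hdw : (d :: r2).dropWhile (· = '.') = d :: r2 := by
            simp [List.dropWhile_cons, hd]
          rw [altGo_cons, if_pos rfl, hdw, altGo_cons none d r2, if_neg hd]
          have hr2 : altGo (some d) r2 = r2 := ih d r2 (by simp at hn ⊢; omega) h.2.2
          rw [hr2]
          simp [digitO, hp, headNum, hh]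
      · rw [altGo_cons, if_neg hc]
        rw [ih c r (by simp at hn ⊢; omega) h.2]

theorem altGo_nf {p : Char} {t : List Char} (h : nfFrom p t) :
    altGo (some p) t = t :=
  altGo_nf_aux t.length p t le_rfl h

theorem altGo_passthrough_aux : ∀ (n : Nat) (a : List Char) (p : Char) (r : List Char),
    a.length ≤ n → nfFrom p a →
    altGo (some p) (a ++ r) = a ++ altGo (some (a.getLastD p)) r := by
  intro n
  induction n with
  | zero =>
    intro a p r hn _
    have : a = [] := by cases a <;> simp_all
    subst this; simp
  | succ n ih =>
    intro a p r hn h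
    cases a with
    | nil => simp
    | cons c t =>
      by_cases hc : c = '.'
      · subst hc
        obtain ⟨hp, hh⟩ := h.1 rfl
        cases t with
        | nil => simp [headNum] at hh
        | cons d t2 =>
          simp only [headNum] at hh
          have hd : d ≠ '.' := isNum_ne_dot hh
          have hdw : List.dropWhile (fun x => decide (x = '.')) (d :: (t2 ++ r)) = d :: (t2 ++ r) := by
            simp [hd]
          rw [List.cons_append, altGo_cons, if_pos rfl, List.cons_append, hdw,
            altGo_cons none d (t2 ++ r), if_neg hd]
          rw [ih t2 d r (by simp at hn ⊢; omega) h.2.2]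
          have hgl : ('.' :: d :: t2).getLastD p = t2.getLastD d := by
            rw [getLastD_cons', getLastD_cons']
          rw [hgl]
          simp [digitO, hp, headNum, hh]
      · rw [List.cons_append, altGo_cons, if_neg hc]
        rw [ih t c r (by simp at hn ⊢; omega) h.2]
        rw [getLastD_cons' c t p]
        simp

theorem altGo_passthrough {a : List Char} {p : Char} (h : nfFrom p a) (r : List Char) :
    altGo (some p) (a ++ r) = a ++ altGo (some (a.getLastD p)) r :=
  altGo_passthrough_aux a.length a p r le_rfl h

theorem altGo_drop_bad {q : Char} {b : List Char}
    (h : isNum q = false ∨ headNum b = false) :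
    altGo (some q) ('.' :: b) = altGo (some q) b := by
  cases b with
  | nil => simp [altGo_cons, altGo_nil, headNum]
  | cons d b2 =>
    by_cases hd : d = '.'
    · subst hd
      have hdw : ('.' :: b2).dropWhile (· = '.') = b2.dropWhile (· = '.') := by
        simp [List.dropWhile_cons]
      rw [altGo_cons (some q) '.' ('.' :: b2), if_pos rfl, hdw,
        altGo_cons (some q) '.' b2, if_pos rfl]
    · have hdw : (d :: b2).dropWhile (· = '.') = d :: b2 := by
        simp [List.dropWhile_cons, hd]
      rw [altGo_cons (some q) '.' (d :: b2), if_pos rfl, hdw]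
      have hkeep : (digitO (some q) && headNum (d :: b2)) = false := by
        rcases h with h | h
        · simp [digitO, h]
        · simp [h]
      rw [hkeep]
      rw [altGo_cons (some q) d b2, if_neg hd, altGo_cons none d b2, if_neg hd]
      simp

theorem nf_of_noBad_aux : ∀ (m : Nat) (l : List Char),
    l.getD (l.length - 1) ' ' ≠ '.' →
    (∀ k, 1 ≤ k → k < l.length - 1 → ¬ badAt l k) →
    ∀ i, 1 ≤ i → l.length - i ≤ m → nfFrom (l.getD (i-1) ' ') (l.drop i) := by
  intro m
  induction m with
  | zero =>
    intro l hlast hnb i hi hm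
    rw [List.drop_eq_nil_of_le (by omega)]
    trivial
  | succ m ih =>
    intro l hlast hnb i hi hm
    by_cases hlt : i < l.length
    · rw [drop_cons_getD hlt]
      refine ⟨?_, ?_⟩
      · intro hdot
        by_cases hend : i = l.length - 1
        · exact absurd (hend ▸ hdot) hlast
        · have hnbi := hnb i hi (by omega)
          have h12 : l.getD (i-1) ' ' ∈ pvNum ∧ l.getD (i+1) ' ' ∈ pvNum := by
            rw [badAt] at hnbi; tauto
          refine ⟨(numIff _).mp h12.1, ?_⟩
          have hlt2 : i + 1 < l.length := by omega
          rw [drop_cons_getD hlt2]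
          simpa [headNum] using (numIff _).mp h12.2
      · have h := ih l hlast hnb (i+1) (by omega) (by omega)
        simpa using h
    · rw [List.drop_eq_nil_of_le (by omega)]
      trivial

theorem nf_of_noBad_take_aux : ∀ (m : Nat) (l : List Char) (i : Nat), i < l.length →
    l.getD i ' ' = '.' → (∀ k, 1 ≤ k → k < i → ¬ badAt l k) →
    ∀ j, 1 ≤ j → j ≤ i → i - j ≤ m → nfFrom (l.getD (j-1) ' ') ((l.drop j).take (i - j)) := by
  intro m
  induction m with
  | zero =>
    intro l i hil hdoti hnb j hj hji hm
    have h0 : i - j = 0 := by omega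
    rw [h0]
    simp only [List.take_zero]
    trivial
  | succ m ih =>
    intro l i hil hdoti hnb j hj hji hm
    by_cases hlt : j < i
    · have hjl : j < l.length := by omega
      have htk : (l.drop j).take (i - j) =
          l.getD j ' ' :: ((l.drop (j+1)).take (i - (j+1))) := by
        rw [drop_cons_getD hjl]
        have h1 : i - j = (i - (j+1)) + 1 := by omega
        rw [h1, List.take_succ_cons]
      rw [htk]
      refine ⟨?_, ?_⟩
      · intro hdot
        have hnbj := hnb j hj hlt
        have h12 : l.getD (j-1) ' ' ∈ pvNum ∧ l.getD (j+1) ' ' ∈ pvNum := by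
          rw [badAt] at hnbj; tauto
        refine ⟨(numIff _).mp h12.1, ?_⟩
        by_cases hj1 : j + 1 < i
        · have hl1 : j + 1 < l.length := by omega
          have htk2 : (l.drop (j+1)).take (i - (j+1)) =
              l.getD (j+1) ' ' :: ((l.drop (j+2)).take (i - (j+2))) := by
            rw [drop_cons_getD hl1]
            have h2 : i - (j+1) = (i - (j+2)) + 1 := by omega
            rw [h2, List.take_succ_cons]
          rw [htk2]
          simpa [headNum] using (numIff _).mp h12.2
        · exfalso
          have hji1 : j + 1 = i := by omega
          have h2 := h12.2
          rw [hji1, hdoti] at h2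
          simp [pvNum] at h2
      · have h := ih l i hil hdoti hnb (j+1) (by omega) (by omega) (by omega)
        simpa using h
    · have h0 : i - j = 0 := by omega
      rw [h0]
      simp only [List.take_zero]
      trivial

theorem getLastD_take_aux : ∀ (m : Nat) (l : List Char) (i : Nat), i ≤ l.length →
    ∀ j, j ≤ i → i - j ≤ m →
    ((l.drop j).take (i - j)).getLastD (l.getD (j-1) ' ') = l.getD (i-1) ' ' := by
  intro m
  induction m with
  | zero =>
    intro l i hil j hji hm
    have h0 : i - j = 0 := by omega
    have hij : j = i := by omega
    rw [h0, hij]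
    simp
  | succ m ih =>
    intro l i hil j hji hm
    by_cases hlt : j < i
    · have hjl : j < l.length := by omega
      have htk : (l.drop j).take (i - j) =
          l.getD j ' ' :: ((l.drop (j+1)).take (i - (j+1))) := by
        rw [drop_cons_getD hjl]
        have h1 : i - j = (i - (j+1)) + 1 := by omega
        rw [h1, List.take_succ_cons]
      rw [htk, getLastD_cons']
      have h := ih l i hil (j+1) (by omega) (by omega)
      simpa using h
    · have hij : j = i := by omega
      have h0 : i - j = 0 := by omega
      rw [h0, hij]
      simp

theorem getLast?_eq_getD {l : List Char} (h : l ≠ []) :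
    l.getLast? = some (l.getD (l.length - 1) ' ') := by
  rw [List.getLast?_eq_getElem?]
  cases l with
  | nil => simp at h
  | cons c t => rw [List.getElem?_eq_getElem (by simp), List.getD_eq_getElem _ _ (by simp)]

theorem notNum {x : Char} (h : x ∉ pvNum) : isNum x = false :=
  Bool.eq_false_iff.mpr (fun ht => h ((numIff x).mpr ht))

theorem remA_cons (c : Char) (t : List Char) :
    remA (c :: t) =
      if c = '.' then remA t
      else if (c :: t).getLast? = some '.' then remA (c :: t).dropLast
      else match findBad (c :: t) 1 with
        | some i => remA ((c :: t).take i ++ (c :: t).drop (i+1))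
        | none => some (c :: t) := by
  rw [remA.eq_def]
  show (if c = '.' then remA t
      else if (c :: t).getLast? = some '.' then remA (c :: t).dropLast
      else match _h : findBad (c :: t) 1 with
        | some i => remA ((c :: t).take i ++ (c :: t).drop (i+1))
        | none => some (c :: t)) = _
  split_ifs
  · rfl
  · rfl
  · split <;> rename_i heq <;> rw [heq]

theorem remA_eq_aux : ∀ (n : Nat) (l : List Char), l.length ≤ n → (∃ c ∈ l, c ≠ '.') →
    remA l = some (altGo none l) := by
  intro n
  induction n with
  | zero =>
    intro l hn hp
    obtain ⟨x, hx, _⟩ := hp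
    cases l
    · simp at hx
    · simp at hn
  | succ n ih =>
    intro l hn hp
    obtain ⟨x, hxm, hxd⟩ := hp
    cases l with
    | nil => simp at hxm
    | cons c t =>
      rw [remA_cons]
      by_cases hc : c = '.'
      · subst hc
        rw [if_pos rfl, altGo_cons_dot]
        apply ih t (by simp at hn ⊢; omega)
        refine ⟨x, ?_, hxd⟩
        simp at hxm
        rcases hxm with rfl | h
        · exact absurd rfl hxd
        · exact h
      · rw [if_neg hc]
        by_cases hlast : (c :: t).getLast? = some '.'
        · rw [if_pos hlast, altGo_dropLast none _ hlast]
          apply ih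
          · rw [List.length_dropLast]; simp at hn ⊢; omega
          · have ht : t ≠ [] := by
              rintro rfl
              simp at hlast
              exact hc hlast
            obtain ⟨d, r, rfl⟩ := List.exists_cons_of_ne_nil ht
            refine ⟨c, ?_, hc⟩
            rw [List.dropLast_cons_of_ne_nil (by simp)]
            simp
        · rw [if_neg hlast]
          cases hfb : findBad (c :: t) 1 with
          | none =>
            have hlast2 : (c :: t).getD ((c :: t).length - 1) ' ' ≠ '.' := by
              intro hEq
              exact hlast (by rw [getLast?_eq_getD (by simp), hEq])
            have hnb := findBad_none hfb
            have hnf := nf_of_noBad_aux (c :: t).length (c :: t) hlast2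
              (fun k hk1 hk2 => hnb k hk1 hk2) 1 le_rfl (by omega)
            simp only [Nat.sub_self, List.getD_cons_zero, List.drop_one,
              List.tail_cons] at hnf
            show some (c :: t) = some (altGo none (c :: t))
            rw [altGo_cons, if_neg hc, altGo_nf hnf]
          | some i =>
            obtain ⟨h1i, hbadat, hmin⟩ := findBad_some hfb
            have hilt : i < (c :: t).length - 1 := findBad_lt hfb
            obtain ⟨i', rfl⟩ : ∃ i', i = i' + 1 := ⟨i - 1, by omega⟩
            have hdoti : (c :: t).getD (i'+1) ' ' = '.' := hbadat.1
            have hlen2 : i' + 2 < (c :: t).length := by simp at hilt ⊢; omega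
            -- the deleted-list recursive call
            have hpre : ∃ y ∈ (c :: t).take (i'+1) ++ (c :: t).drop (i'+2), y ≠ '.' := by
              refine ⟨c, ?_, hc⟩
              simp [List.take_succ_cons]
            have hlend : ((c :: t).take (i'+1) ++ (c :: t).drop (i'+2)).length ≤ n := by
              rw [List.length_append, List.length_take, List.length_drop]
              simp at hn hlen2 ⊢
              omega
            show remA (List.take (i'+1) (c :: t) ++ List.drop (i'+2) (c :: t)) =
              some (altGo none (c :: t))
            rw [ih _ hlend hpre]
            congr 1
            -- notation for the pieces
            have hnf := nf_of_noBad_take_aux (c :: t).length (c :: t) (i'+1)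
              (by omega) hdoti (fun k hk1 hk2 => hmin k hk1 hk2) 1 le_rfl (by omega) (by omega)
            simp only [Nat.sub_self, List.getD_cons_zero, List.drop_one, List.tail_cons,
              Nat.add_sub_cancel] at hnf
            have hq := getLastD_take_aux (c :: t).length (c :: t) (i'+1) (by omega) 1
              (by omega) (by omega)
            simp only [Nat.sub_self, List.getD_cons_zero, List.drop_one, List.tail_cons,
              Nat.add_sub_cancel] at hq
            have hdropi : t.drop i' = '.' :: (c :: t).drop (i'+2) := by
              have h1 : (c :: t).drop (i'+1) = (c :: t).getD (i'+1) ' ' :: (c :: t).drop (i'+2) :=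
                drop_cons_getD (by omega)
            -- (c::t).drop (i'+1) = t.drop i'
              rw [List.drop_succ_cons] at h1
              rw [h1, hdoti]
            have hb : (c :: t).drop (i'+2) =
                (c :: t).getD (i'+2) ' ' :: (c :: t).drop (i'+3) := drop_cons_getD hlen2
            have hor : isNum ((t.take i').getLastD c) = false ∨
                headNum ((c :: t).drop (i'+2)) = false := by
              rcases hbadat.2 with h | h
              · left
                rw [hq]
                exact notNum (by simpa using h)
              · right
                rw [hb]
                simp only [headNum]
                exact notNum (by simpa using h)
            have htake : (c :: t).take (i'+1) = c :: t.take i' := by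
              simp [List.take_succ_cons]
            rw [htake, List.cons_append, altGo_cons, if_neg hc,
              altGo_cons none c t, if_neg hc]
            congr 1
            conv_rhs => rw [← List.take_append_drop i' t]
            rw [altGo_passthrough hnf, altGo_passthrough hnf, hdropi,
              altGo_drop_bad hor]

theorem drop_skipDots_aux : ∀ (m : Nat) (l : List Char) (i : Nat), l.length - i ≤ m →
    l.drop (skipDots l i) = (l.drop i).dropWhile (· = '.') := by
  intro m
  induction m with
  | zero =>
    intro l i hm
    rw [skipDots, dif_neg (by omega), List.drop_eq_nil_of_le (by omega)]
    simp
  | succ m ih =>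
    intro l i hm
    by_cases hi : i < l.length
    · by_cases hc : l.getD i ' ' = '.'
      · rw [skipDots, dif_pos hi, if_pos hc, ih l (i+1) (by omega),
          drop_cons_getD hi, List.dropWhile_cons, hc]
        simp
      · rw [skipDots, dif_pos hi, if_neg hc, drop_cons_getD hi, List.dropWhile_cons]
        simp only [hc, decide_false]
        rw [← drop_cons_getD hi]
        simp [hc]
    · rw [skipDots, dif_neg hi, List.drop_eq_nil_of_le (by omega)]
      simp
theorem skipDots_prev_aux : ∀ (m : Nat) (l : List Char) (i : Nat), l.length - i ≤ m →
    i < l.length → l.getD i ' ' = '.' → l.getD (skipDots l i - 1) ' ' = '.' := by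
  intro m
  induction m with
  | zero => intro l i hm hi hc; omega
  | succ m ih =>
    intro l i hm hi hc
    rw [skipDots, dif_pos hi, if_pos hc]
    by_cases h2 : i + 1 < l.length ∧ l.getD (i+1) ' ' = '.'
    · exact ih l (i+1) (by omega) h2.1 h2.2
    · have hstop : skipDots l (i+1) = i + 1 := by
        rw [skipDots]
        by_cases h3 : i + 1 < l.length
        · rw [dif_pos h3, if_neg (fun hcc => h2 ⟨h3, hcc⟩)]
        · rw [dif_neg h3]
      rw [hstop]
      simpa using hc

theorem findDot_none_no_dot : ∀ (m : Nat) (l : List Char) (i : Nat), l.length - i ≤ m →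
    findDot l i = none → '.' ∉ l.drop i := by
  intro m
  induction m with
  | zero =>
    intro l i hm _
    rw [List.drop_eq_nil_of_le (by omega)]
    simp
  | succ m ih =>
    intro l i hm hf
    by_cases hi : i < l.length
    · rw [findDot, dif_pos hi] at hf
      by_cases hc : l.getD i ' ' = '.'
      · rw [if_pos hc] at hf; simp at hf
      · rw [if_neg hc] at hf
        rw [drop_cons_getD hi]
        intro hmem
        rcases List.mem_cons.mp hmem with h | h
        · exact hc h.symm
        · exact ih l (i+1) (by omega) hf h
    · rw [List.drop_eq_nil_of_le (by omega)]
      simp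

theorem findDot_some_seg : ∀ (m : Nat) (l : List Char) (i j : Nat), l.length - i ≤ m →
    findDot l i = some j → '.' ∉ (l.drop i).take (j - i) := by
  intro m
  induction m with
  | zero =>
    intro l i j hm hf
    rw [List.drop_eq_nil_of_le (by omega)]
    simp
  | succ m ih =>
    intro l i j hm hf
    obtain ⟨hij, hjl, hdot⟩ := findDot_some_facts hf
    rw [findDot, dif_pos (by omega)] at hf
    by_cases hc : l.getD i ' ' = '.'
    · rw [if_pos hc] at hf
      simp at hf
      subst hf
      simp
    · rw [if_neg hc] at hf
      have hij2 := (findDot_some_facts hf).1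
      have htk : (l.drop i).take (j - i) =
          l.getD i ' ' :: ((l.drop (i+1)).take (j - (i+1))) := by
        rw [drop_cons_getD (by omega)]
        have h1 : j - i = (j - (i+1)) + 1 := by omega
        rw [h1, List.take_succ_cons]
      rw [htk]
      intro hmem
      rcases List.mem_cons.mp hmem with h | h
      · exact hc h.symm
      · exact ih l (i+1) j (by omega) hf h

theorem nfFrom_no_dot : ∀ (t : List Char) (p : Char), '.' ∉ t → nfFrom p t := by
  intro t
  induction t with
  | nil => intro p _; trivial
  | cons c r ih =>
    intro p hnd
    refine ⟨fun hc => absurd (hc ▸ List.mem_cons_self) hnd, ?_⟩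
    exact ih c (fun hm => hnd (List.mem_cons_of_mem _ hm))

theorem altGo_no_dot {t : List Char} (hnd : '.' ∉ t) (prevO : Option Char) :
    altGo prevO t = t := by
  cases prevO with
  | some p => exact altGo_nf (nfFrom_no_dot t p hnd)
  | none =>
    cases t with
    | nil => exact altGo_nil _
    | cons c r =>
      have hc : c ≠ '.' := fun h => hnd (h ▸ List.mem_cons_self)
      rw [altGo_cons, if_neg hc,
        altGo_nf (nfFrom_no_dot r c (fun hm => hnd (List.mem_cons_of_mem _ hm)))]

-- passing the dot-free chunk s[i:j] through the collapsing pass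
theorem seg_pass {l : List Char} {i j : Nat} (hij : i ≤ j) (hjl : j < l.length)
    (hseg : '.' ∉ (l.drop i).take (j - i)) :
    altGo (if i = 0 then none else some (l.getD (i-1) ' ')) (l.drop i) =
      (l.drop i).take (j - i) ++
        altGo (if j = 0 then none else some (l.getD (j-1) ' ')) (l.drop j) := by
  have hsp : l.drop i = (l.drop i).take (j - i) ++ l.drop j := by
    conv_lhs => rw [← List.take_append_drop (j - i) (l.drop i)]
    rw [List.drop_drop]
    have h1 : i + (j - i) = j := by omega
    rw [h1]
  cases hs : (l.drop i).take (j - i) with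
  | nil =>
    have hji : j = i := by
      have h2 : (l.drop i).length = l.length - i := List.length_drop
      have h3 : ((l.drop i).take (j - i)).length = min (j - i) (l.length - i) := by
        rw [List.length_take, h2]
      rw [hs] at h3
      simp at h3
      omega
    subst hji
    simp
  | cons c t =>
    have hlastd : ∀ p : Char, (c :: t).getLastD p = l.getD (j-1) ' ' := by
      intro p
      rw [getLastD_cons' c t p, ← getLastD_cons' c t (l.getD (i-1) ' '), ← hs,
        getLastD_take_aux l.length l j (by omega) i hij (by omega)]
    have hcnd : c ≠ '.' := fun h => (hs ▸ hseg) (h ▸ List.mem_cons_self)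
    have htnd : '.' ∉ t := fun hm => (hs ▸ hseg) (List.mem_cons_of_mem _ hm)
    have hj0 : ¬ (j = 0) := by
      have h2 : (l.drop i).length = l.length - i := List.length_drop
      have h3 : ((l.drop i).take (j - i)).length = min (j - i) (l.length - i) := by
        rw [List.length_take, h2]
      rw [hs] at h3
      simp at h3
      omega
    rw [if_neg hj0, hsp, hs]
    by_cases hi0 : i = 0
    · rw [if_pos hi0, List.cons_append, altGo_cons, if_neg hcnd,
        altGo_passthrough (nfFrom_no_dot t c htnd), ← getLastD_cons' c t c, hlastd c]
      simp
    · rw [if_neg hi0, List.cons_append, altGo_cons, if_neg hcnd,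
        altGo_passthrough (nfFrom_no_dot t c htnd), ← getLastD_cons' c t c, hlastd c]
      simp

theorem bloop_unfold (l : List Char) (i : Nat) (out : List Char) :
    bloop l i out = match findDot l i with
      | none => out ++ l.drop i
      | some j =>
        bloop l (skipDots l j)
          (if 0 < j ∧ isNum (l.getD (j-1) ' ') ∧ skipDots l j < l.length ∧
              isNum (l.getD (skipDots l j) ' ')
           then (out ++ (l.drop i).take (j - i)) ++ ['.']
           else out ++ (l.drop i).take (j - i)) := by
  rw [bloop.eq_def]
  split <;> rename_i heq <;> rw [heq]

theorem bloop_none {l : List Char} {i : Nat} (out : List Char)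
    (h : findDot l i = none) : bloop l i out = out ++ l.drop i := by
  rw [bloop_unfold, h]

theorem bloop_some {l : List Char} {i j : Nat} (out : List Char)
    (h : findDot l i = some j) :
    bloop l i out = bloop l (skipDots l j)
      (if 0 < j ∧ isNum (l.getD (j-1) ' ') ∧ skipDots l j < l.length ∧
          isNum (l.getD (skipDots l j) ' ')
       then (out ++ (l.drop i).take (j - i)) ++ ['.']
       else out ++ (l.drop i).take (j - i)) := by
  rw [bloop_unfold, h]

theorem bloop_eq_aux : ∀ (m : Nat) (l : List Char) (i : Nat) (out : List Char),
    l.length - i ≤ m → bloop l i out =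
      out ++ altGo (if i = 0 then none else some (l.getD (i-1) ' ')) (l.drop i) := by
  intro m
  induction m with
  | zero =>
    intro l i out hm
    have hf : findDot l i = none := by rw [findDot, dif_neg (by omega)]
    rw [bloop_none out hf, altGo_no_dot (findDot_none_no_dot 0 l i (by omega) hf)]
  | succ m ih =>
    intro l i out hm
    cases hf : findDot l i with
    | none =>
      rw [bloop_none out hf, altGo_no_dot (findDot_none_no_dot (m+1) l i (by omega) hf)]
    | some j =>
      obtain ⟨hij, hjl, hdot⟩ := findDot_some_facts hf
      rw [bloop_some out hf]
      set k := skipDots l j with hkdef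
      have hjk : j < k := skipDots_gt hjl hdot
      rw [ih l k _ (by omega)]
      have hk0 : ¬ (k = 0) := by omega
      rw [if_neg hk0]
      have hkprev : l.getD (k - 1) ' ' = '.' :=
        skipDots_prev_aux (l.length - j) l j le_rfl hjl hdot
      rw [hkprev, altGo_nondigit (by simp [isNum] : isNum '.' = false)]
      rw [seg_pass hij hjl (findDot_some_seg (m+1) l i j (by omega) hf)]
      have hdw : (l.drop (j+1)).dropWhile (· = '.') = l.drop k := by
        rw [hkdef, drop_skipDots_aux (l.length - j) l j le_rfl, drop_cons_getD hjl,
          List.dropWhile_cons, hdot]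
        simp
      rw [drop_cons_getD hjl, hdot, altGo_cons, if_pos rfl, hdw]
      by_cases hP : 0 < j ∧ isNum (l.getD (j-1) ' ') ∧ k < l.length ∧ isNum (l.getD k ' ')
      · rw [if_pos hP]
        obtain ⟨h1, h2, h3, h4⟩ := hP
        have hkeep : (digitO (if j = 0 then none else some (l.getD (j-1) ' ')) &&
            headNum (l.drop k)) = true := by
          rw [if_neg (by omega : ¬ (j = 0)), drop_cons_getD h3]
          simp only [digitO, headNum, h2, h4, Bool.and_self]
        rw [hkeep]
        simp
      · rw [if_neg hP]
        have hkeep : (digitO (if j = 0 then none else some (l.getD (j-1) ' ')) &&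
            headNum (l.drop k)) = false := by
          by_cases hj0 : j = 0
          · simp [hj0, digitO]
          · rw [if_neg hj0]
            by_cases h2 : isNum (l.getD (j-1) ' ') = true
            · by_cases hk : k < l.length
              · have h4 : isNum (l.getD k ' ') = false := by
                  cases hb : isNum (l.getD k ' ')
                  · rfl
                  · exact absurd ⟨by omega, h2, hk, hb⟩ hP
                rw [drop_cons_getD hk]
                simp only [digitO, headNum, h4, Bool.and_false]
              · rw [List.drop_eq_nil_of_le (by omega)]
                simp [headNum]
            · have h2f : isNum (l.getD (j-1) ' ') = false := by
                cases hb : isNum (l.getD (j-1) ' ')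
                · rfl
                · exact absurd hb h2
              simp only [digitO, h2f, Bool.false_and]
        rw [hkeep]
        simp

theorem bloop_eq (l : List Char) : bloop l 0 [] = altGo none l := by
  rw [bloop_eq_aux l.length l 0 [] (by omega)]
  simp

theorem remA_eq {l : List Char} (h : ∃ c ∈ l, c ≠ '.') :
    remA l = some (altGo none l) :=
  remA_eq_aux l.length l le_rfl h

-- ===== VERDICT (by name: the statement is the Claim_ definition above) =====
theorem removeDot_spec : Claim_equal_removeDot := by
  intro s _ hpre
  unfold Pre_removeDot at hpre
  have hex : ∃ c ∈ s.toList, c ≠ '.' := by simpa using hpre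
  unfold Spec_removeDot removeDot removeDot_alt
  rw [remA_eq hex, bloop_eq]
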